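-- pv_equiv track=rewrite | github.com/minerharry/SegmenterProcessing | utils/CZI.py | groupkeys
-- ===== SOURCE A (Python) =====
-- from typing import Collection
--
-- def groupkeys(keys:Collection[str])->dict[int,str]:
--     res:dict[int,str] = {}
--     for k in keys:
--         if "#" in k:
--             res[int(k.split("#")[1])] = k
--         else:
--             res[0] = k #this is the special case with no number. Explicitly checked for with extract ROIs.
--
--     if len(res) < len(keys):
--         raise ValueError("Duplicate key numbers found in collection!")
--
--     return res
-- ===== SOURCE B (Python) =====
-- def groupkeys(keys):
--     def go(ks, seen):
--         if not ks:
--             return []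
--         k = ks[0]
--         n = int(k.split("#")[1]) if "#" in k else 0
--         if n in seen:
--             raise ValueError("Duplicate key numbers found in collection!")
--         return [(n, k)] + go(ks[1:], seen | {n})
--     return dict(go(list(keys), frozenset()))
-- ===== Notes on version B (the rewrite author's own statement) =====
-- stated objective: alternative
-- what changed: Replaces A's dict-overwrite loop with a post-hoc length comparison by a recursive single pass that keeps a 'seen' set of numbers, raises on the FIRST repeated number, and builds the (number, key) pair list directly head-to-tail.
import Mathlib
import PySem

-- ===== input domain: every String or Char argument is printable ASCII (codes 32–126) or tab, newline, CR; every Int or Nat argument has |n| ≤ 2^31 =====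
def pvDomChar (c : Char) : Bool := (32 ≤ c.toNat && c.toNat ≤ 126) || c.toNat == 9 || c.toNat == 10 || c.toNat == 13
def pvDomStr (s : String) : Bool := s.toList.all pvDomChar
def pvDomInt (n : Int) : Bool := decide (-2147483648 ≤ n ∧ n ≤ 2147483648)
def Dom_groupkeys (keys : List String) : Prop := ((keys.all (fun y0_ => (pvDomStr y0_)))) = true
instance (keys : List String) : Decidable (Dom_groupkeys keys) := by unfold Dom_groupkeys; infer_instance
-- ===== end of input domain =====

-- B replaces A's dict-overwrite loop + final length comparison by a recursive single pass with a 'seen' set that raises on the first repeated number and builds the pair list directly.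


-- ===== PORT A =====
-- for k in keys: if "#" in k: res[int(k.split("#")[1])] = k else: res[0] = k; then the duplicate
-- check raises (excluded by Pre_), else return res.  int() raising = ofStr? none (excluded by Pre_).
def groupkeys (keys : List String) : List (Int × String) :=
  (keys.foldl (fun (res : PySem.Dict Int String) k =>
      if PySem.Str.isIn "#" k then
        match PySem.Int.ofStr? (((PySem.Str.split? k "#").getD []).getD 1 "") with
        | some n => res.insert n k
        | none => res          -- int() raises ValueError here: outside Pre_
      else res.insert 0 k) PySem.Dict.empty).items

-- ===== PORT B =====
-- n = int(k.split("#")[1]) if "#" in k else 0   (0 as a fallback where int() raises, outside Pre_)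
def keyNum (k : String) : Int :=
  if PySem.Str.isIn "#" k then
    (PySem.Int.ofStr? (((PySem.Str.split? k "#").getD []).getD 1 "")).getD 0
  else 0

-- def go(ks, seen): recursive pass; 'n in seen' raises ValueError (outside Pre_), else [(n,k)] + go(ks[1:], seen | {n})
def groupkeysGo : List String → PySem.Set Int → List (Int × String)
  | [], _ => []
  | k :: ks, seen =>
    let n := keyNum k
    if PySem.Set.contains seen n then []   -- raise ValueError: outside Pre_
    else [(n, k)] ++ groupkeysGo ks (PySem.Set.add seen n)

-- return dict(go(list(keys), frozenset()))
def groupkeys_alt (keys : List String) : List (Int × String) :=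
  (PySem.Dict.ofList (groupkeysGo keys PySem.Set.empty)).items

-- ===== PRECONDITION & SPEC =====
-- exactly the inputs where A returns: every '#'-key's number parses (int() does not raise) and the numbers are pairwise distinct
def Pre_groupkeys (keys : List String) : Prop :=
  (∀ k ∈ keys, PySem.Str.isIn "#" k = true →
      (PySem.Int.ofStr? (((PySem.Str.split? k "#").getD []).getD 1 "")).isSome = true) ∧
  (keys.map keyNum).Nodup

instance (keys : List String) : Decidable (Pre_groupkeys keys) := by unfold Pre_groupkeys; infer_instance

def pvWitness_groupkeys : List String := ["a#1", "b#2", "c"]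

def Spec_groupkeys (keys : List String) (out : List (Int × String)) : Prop := out = groupkeys_alt keys
instance (keys : List String) (out : List (Int × String)) : Decidable (Spec_groupkeys keys out) := by unfold Spec_groupkeys; infer_instance

-- ===== CLAIM (what is proved, stated in full; the proofs are below) =====
def Claim_equal_groupkeys : Prop := ∀ (keys : List String), Dom_groupkeys keys → Pre_groupkeys keys → Spec_groupkeys keys (groupkeys keys)

-- ===== LEMMAS AND PROOFS =====

-- under Pre_, A's loop body is exactly "insert the key under its number"
theorem groupkeys_foldl_eq (keys : List String)
    (h : ∀ k ∈ keys, PySem.Str.isIn "#" k = true →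
      (PySem.Int.ofStr? (((PySem.Str.split? k "#").getD []).getD 1 "")).isSome = true) :
    groupkeys keys =
      (keys.foldl (fun (res : PySem.Dict Int String) k => res.insert (keyNum k) k) PySem.Dict.empty).items := by
  unfold groupkeys
  congr 1
  apply PySem.List.foldl_congr_mem
  intro acc k hk
  cases hb : PySem.Str.isIn "#" k with
  | true =>
    obtain ⟨n, hn⟩ := Option.isSome_iff_exists.mp (h k hk hb)
    simp only [keyNum, hb, hn, if_true, Option.getD_some]
  | false =>
    simp only [keyNum, hb, Bool.false_eq_true, if_false]

theorem groupkeys_items (keys : List String) (hnd : (keys.map keyNum).Nodup)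
    (h : ∀ k ∈ keys, PySem.Str.isIn "#" k = true →
      (PySem.Int.ofStr? (((PySem.Str.split? k "#").getD []).getD 1 "")).isSome = true) :
    groupkeys keys = keys.map (fun k => (keyNum k, k)) := by
  rw [groupkeys_foldl_eq keys h]
  rw [PySem.Dict.items_foldl_insert_fresh keys keyNum (fun k => k) PySem.Dict.empty
      (fun a _ => PySem.Dict.contains_empty _) hnd]
  simp [PySem.Dict.empty]

-- B's recursion, on fresh distinct numbers, is exactly the map
theorem groupkeysGo_eq (keys : List String) (seen : PySem.Set Int)
    (hnd : (keys.map keyNum).Nodup)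
    (hfresh : ∀ n ∈ keys.map keyNum, n ∉ seen) :
    groupkeysGo keys seen = keys.map (fun k => (keyNum k, k)) := by
  induction keys generalizing seen with
  | nil => rfl
  | cons k ks ih =>
    have hcont : PySem.Set.contains seen (keyNum k) = false := by
      rw [← Bool.not_eq_true, PySem.Set.contains_iff]
      exact hfresh (keyNum k) (by simp)
    simp only [groupkeysGo, hcont, Bool.false_eq_true, if_false, List.map_cons,
      List.singleton_append, List.cons.injEq, true_and]
    apply ih
    · exact (List.nodup_cons.mp hnd).2
    · intro n hn
      rw [PySem.Set.mem_add]
      rintro (h1 | h2)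
      · exact hfresh n (by simp [List.mem_map] at hn ⊢; tauto) h1
      · exact (List.nodup_cons.mp hnd).1 (h2 ▸ hn)

theorem groupkeys_alt_items (keys : List String) (hnd : (keys.map keyNum).Nodup) :
    groupkeys_alt keys = keys.map (fun k => (keyNum k, k)) := by
  unfold groupkeys_alt
  rw [groupkeysGo_eq keys PySem.Set.empty hnd (by intro n _ h; cases h)]
  show (PySem.Dict.empty.update (keys.map fun k => (keyNum k, k))).items = _
  rw [show (PySem.Dict.update (PySem.Dict.empty) (keys.map fun k => (keyNum k, k))) =
      (keys.map fun k => (keyNum k, k)).foldl (fun (d : PySem.Dict Int String) p => d.insert p.1 p.2) PySem.Dict.empty from rfl]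
  rw [PySem.Dict.items_foldl_insert_fresh (keys.map fun k => (keyNum k, k)) Prod.fst Prod.snd PySem.Dict.empty
      (fun a _ => PySem.Dict.contains_empty _)
      (by simpa [List.map_map, Function.comp] using hnd)]
  simp [PySem.Dict.empty]

-- ===== VERDICT (by name: the statement is the Claim_ definition above) =====
theorem groupkeys_spec : Claim_equal_groupkeys := by
  intro keys _ hpre
  obtain ⟨h, hnd⟩ := hpre
  unfold Spec_groupkeys
  rw [groupkeys_items keys hnd h, groupkeys_alt_items keys hnd]
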